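-- pv_equiv track=rewrite | github.com/JaeyunPark1223/PS | 백준/Silver/24495. Non－Transitive Dice/Non－Transitive Dice.py | x_beats_y
-- ===== SOURCE A (Python) =====
-- def x_beats_y(A,B) :
--   score_a,score_b = 0,0
--   for a in A :
--     for b in B :
--       if a > b : score_a += 1
--       elif b > a : score_b += 1
--   if score_a > score_b :  return True
--   return False
-- ===== SOURCE B (Python) =====
-- def _bisect_left(xs, x):
--     # standard bisect_left (hand-written: the module imports nothing)
--     lo, hi = 0, len(xs)
--     while lo < hi:
--         mid = (lo + hi) // 2
--         if xs[mid] < x: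
--             lo = mid + 1
--         else:
--             hi = mid
--     return lo
--
--
-- def _bisect_right(xs, x):
--     # standard bisect_right
--     lo, hi = 0, len(xs)
--     while lo < hi:
--         mid = (lo + hi) // 2
--         if x < xs[mid]:
--             hi = mid
--         else:
--             lo = mid + 1
--     return lo
--
--
-- def x_beats_y(A, B):
--     Bs = sorted(B)
--     m = len(Bs)
--     score_a = 0
--     score_b = 0
--     for a in A:
--         score_a += _bisect_left(Bs, a)       # faces of B strictly below a
--         score_b += m - _bisect_right(Bs, a)  # faces of B strictly above a
--     return score_a > score_b
-- ===== Notes on version B (the rewrite author's own statement) =====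
-- stated objective: faster
-- what changed: Instead of comparing every face pair in a nested loop, B sorts B once and uses binary search (bisect_left/bisect_right) per face of A to count smaller and larger faces.
import Mathlib
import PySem

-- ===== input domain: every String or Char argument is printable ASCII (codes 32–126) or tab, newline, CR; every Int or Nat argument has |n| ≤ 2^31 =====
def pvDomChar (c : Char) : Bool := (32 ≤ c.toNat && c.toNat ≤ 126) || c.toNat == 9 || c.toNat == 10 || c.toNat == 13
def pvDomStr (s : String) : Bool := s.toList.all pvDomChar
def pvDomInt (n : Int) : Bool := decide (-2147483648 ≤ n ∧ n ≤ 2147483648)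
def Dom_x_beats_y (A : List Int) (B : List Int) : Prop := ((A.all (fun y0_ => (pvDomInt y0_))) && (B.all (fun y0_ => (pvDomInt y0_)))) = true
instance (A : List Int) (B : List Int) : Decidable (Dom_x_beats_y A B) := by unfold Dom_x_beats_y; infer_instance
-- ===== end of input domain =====

-- B replaces A's nested pairwise comparison loop by sorting B once and counting
-- smaller/larger faces with binary search per face of A (objective: faster).


-- ===== PORT A =====
-- literal transliteration: nested for-loops accumulating (score_a, score_b)
def x_beats_y (A : List Int) (B : List Int) : Bool :=
  let s : Int × Int :=
    A.foldl (fun s a =>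
      B.foldl (fun t b =>
        if a > b then (t.1 + 1, t.2)
        else if b > a then (t.1, t.2 + 1)
        else t) s) (0, 0)
  if s.1 > s.2 then true else false

-- ===== PORT B =====
-- Source B's hand-written _bisect_left/_bisect_right are exactly Python's standard
-- bisect loops, ported as the PySem primitives PySem.List.bisectLeft/bisectRight
-- (the same lo/hi binary-search loop).
def x_beats_y_alt (A : List Int) (B : List Int) : Bool :=
  let Bs := PySem.List.sorted B (fun x => x) false
  let m := Bs.length
  let s : Nat × Nat :=
    A.foldl (fun s a =>
      (s.1 + PySem.List.bisectLeft Bs a,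
       s.2 + (m - PySem.List.bisectRight Bs a))) (0, 0)
  decide (s.1 > s.2)

-- ===== PRECONDITION & SPEC =====
def Spec_x_beats_y (A : List Int) (B : List Int) (out : Bool) : Prop := out = x_beats_y_alt A B
instance (A : List Int) (B : List Int) (out : Bool) : Decidable (Spec_x_beats_y A B out) := by unfold Spec_x_beats_y; infer_instance

-- ===== CLAIM (what is proved, stated in full; the proofs are below) =====
def Claim_equal_x_beats_y : Prop := ∀ (A : List Int) (B : List Int), Dom_x_beats_y A B → Spec_x_beats_y A B (x_beats_y A B)

-- ===== LEMMAS AND PROOFS =====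

-- a list whose j-th element satisfies p exactly when j < k has countP p = k
theorem countP_of_prefix {α : Type} (p : α → Bool) :
    ∀ (xs : List α) (k : Nat), k ≤ xs.length →
      (∀ j (hj : j < xs.length), p xs[j] = decide (j < k)) →
      xs.countP p = k := by
  intro xs
  induction xs with
  | nil => intro k hk _; simpa using (Nat.le_zero.mp hk).symm
  | cons x xs ih =>
    intro k hk h
    cases k with
    | zero =>
      have hx : p x = false := by simpa using h 0 (by simp)
      have : xs.countP p = 0 := ih 0 (Nat.zero_le _) (by
        intro j hj
        simpa using h (j+1) (by simpa using Nat.succ_lt_succ hj))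
      simp [hx, this]
    | succ k' =>
      have hx : p x = true := by simpa using h 0 (by simp)
      have : xs.countP p = k' := ih k' (by simpa using hk) (by
        intro j hj
        have := h (j+1) (by simpa using Nat.succ_lt_succ hj)
        simpa using this)
      simp [hx, this]

-- a list whose j-th element satisfies p exactly when k ≤ j has countP p = length - k
theorem countP_of_suffix {α : Type} (p : α → Bool) :
    ∀ (xs : List α) (k : Nat), k ≤ xs.length →
      (∀ j (hj : j < xs.length), p xs[j] = decide (k ≤ j)) →
      xs.countP p = xs.length - k := by
  intro xs
  induction xs with
  | nil => intro k hk _; simp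
  | cons x xs ih =>
    intro k hk h
    cases k with
    | zero =>
      have hx : p x = true := by simpa using h 0 (by simp)
      have : xs.countP p = xs.length - 0 := ih 0 (Nat.zero_le _) (by
        intro j hj
        simpa using h (j+1) (by simpa using Nat.succ_lt_succ hj))
      simp [hx] at this ⊢
      omega
    | succ k' =>
      have hx : p x = false := by simpa using h 0 (by simp)
      have : xs.countP p = xs.length - k' := ih k' (by simpa using hk) (by
        intro j hj
        have := h (j+1) (by simpa using Nat.succ_lt_succ hj)
        simpa using this)
      simp [hx, this]

theorem bisectLeft_eq_countP (xs : List Int) (a : Int)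
    (h : xs.Pairwise (fun u v => u ≤ v)) :
    PySem.List.bisectLeft xs a = xs.countP (fun b => decide (b < a)) := by
  obtain ⟨hk, hlt, hge⟩ := PySem.List.bisectLeft_spec xs a h
  symm
  refine countP_of_prefix _ xs _ hk ?_
  intro j hj
  by_cases hcase : j < PySem.List.bisectLeft xs a
  · simp [hlt j hj hcase, hcase]
  · have := hge j hj (Nat.le_of_not_lt hcase)
    simp [hcase]
    omega

theorem sub_bisectRight_eq_countP (xs : List Int) (a : Int)
    (h : xs.Pairwise (fun u v => u ≤ v)) :
    xs.length - PySem.List.bisectRight xs a = xs.countP (fun b => decide (a < b)) := by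
  obtain ⟨hk, hle, hgt⟩ := PySem.List.bisectRight_spec xs a h
  symm
  refine countP_of_suffix _ xs _ hk ?_
  intro j hj
  by_cases hcase : PySem.List.bisectRight xs a ≤ j
  · simp [hgt j hj hcase, hcase]
  · have := hle j hj (Nat.lt_of_not_le hcase)
    simp [hcase]
    omega

-- inner loop of A: adds the two pair counts to the accumulator
theorem innerA (a : Int) :
    ∀ (B : List Int) (s : Int × Int),
      B.foldl (fun t b =>
        if a > b then (t.1 + 1, t.2)
        else if b > a then (t.1, t.2 + 1)
        else t) s
      = (s.1 + (B.countP (fun b => decide (b < a)) : Int),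
         s.2 + (B.countP (fun b => decide (a < b)) : Int)) := by
  intro B
  induction B with
  | nil => intro s; simp
  | cons b B ih =>
    intro s
    by_cases h1 : b < a
    · have h2 : ¬ a < b := by omega
      simp [List.foldl_cons, h1, h2, ih]
      omega
    · by_cases h2 : a < b
      · simp [List.foldl_cons, h1, h2, ih]
        omega
      · simp [List.foldl_cons, h1, h2, ih]

-- a fold that adds f and g componentwise sums the mapped lists
theorem pair_foldl {α M : Type} [AddCommMonoid M] (f g : α → M) :
    ∀ (xs : List α) (s : M × M),
      xs.foldl (fun s a => (s.1 + f a, s.2 + g a)) s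
      = (s.1 + (xs.map f).sum, s.2 + (xs.map g).sum) := by
  intro xs
  induction xs with
  | nil => intro s; simp
  | cons x xs ih =>
    intro s
    simp [List.foldl_cons, ih, add_assoc]

-- ===== VERDICT (by name: the statement is the Claim_ definition above) =====
theorem x_beats_y_spec : Claim_equal_x_beats_y := by
  intro A B _
  unfold Spec_x_beats_y x_beats_y x_beats_y_alt
  have hpair : (PySem.List.sorted B (fun x => x) false).Pairwise (fun u v => u ≤ v) := by
    simpa using PySem.List.sorted_pairwise B (fun x => x)
  have hperm : (PySem.List.sorted B (fun x => x) false).Perm B :=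
    PySem.List.sorted_perm B (fun x => x) false
  set Bs := PySem.List.sorted B (fun x => x) false with hBs
  -- per-face counts
  set ca : Int → Nat := fun a => B.countP (fun b => decide (b < a)) with hca
  set cb : Int → Nat := fun a => B.countP (fun b => decide (a < b)) with hcb
  -- A's nested fold computes the summed pair counts
  have hfunA : (fun (s : Int × Int) a =>
      B.foldl (fun t b =>
        if a > b then (t.1 + 1, t.2)
        else if b > a then (t.1, t.2 + 1)
        else t) s)
      = (fun (s : Int × Int) a => (s.1 + (ca a : Int), s.2 + (cb a : Int))) := by
    funext s a
    simpa [hca, hcb] using innerA a B s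
  -- B's fold adds bisect counts, which equal the pair counts
  have hbl : ∀ a, PySem.List.bisectLeft Bs a = ca a := by
    intro a
    rw [bisectLeft_eq_countP Bs a hpair, hperm.countP_eq]
  have hbr : ∀ a, Bs.length - PySem.List.bisectRight Bs a = cb a := by
    intro a
    rw [sub_bisectRight_eq_countP Bs a hpair, hperm.countP_eq]
  have hfunB : (fun (s : Nat × Nat) a =>
      (s.1 + PySem.List.bisectLeft Bs a, s.2 + (Bs.length - PySem.List.bisectRight Bs a)))
      = (fun (s : Nat × Nat) a => (s.1 + ca a, s.2 + cb a)) := by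
    funext s a
    rw [hbl a, hbr a]
  simp only [hfunA, hfunB, pair_foldl ca cb, pair_foldl (fun a => ((ca a : Nat) : Int)) (fun a => ((cb a : Nat) : Int))]
  have hcast : ∀ (f : Int → Nat),
      (A.map (fun a => ((f a : Nat) : Int))).sum = ((A.map f).sum : Int) := by
    intro f
    rw [Nat.cast_list_sum, List.map_map]
    rfl
  simp only [hcast, zero_add]
  split_ifs with h
  · simp [Nat.cast_lt.mp (gt_iff_lt.mp h)]
  · simp [show ¬ (A.map cb).sum < (A.map ca).sum from fun hh => h (Nat.cast_lt.mpr hh)]
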